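-- pv_equiv track=rewrite | github.com/sonnyli/flash_attention_from_scratch | py/flash_helpers/build/ptx_sass.py | find_section_size
-- ===== SOURCE A (Python) =====
-- def section_line_numbers(lines: list[str]) -> list[int]:
--     return [n for n, line in enumerate(lines) if line.startswith(".section")]
--
-- def find_section_size(lines: list[str], section_name: str) -> int:
--     sections = section_line_numbers(lines)
--     for n, section in enumerate(sections):
--         line = lines[section]
--         if line.strip() == f".section {section_name}":
--             if n < len(sections) - 1:
--                 return sections[n + 1] - section
--             else:
--                 return len(lines) - section
--     return 0
-- ===== SOURCE B (Python) =====
-- def find_section_size(lines: list[str], section_name: str) -> int: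
--     target = f".section {section_name}"
--     for i, line in enumerate(lines):
--         if line.startswith(".section") and line.strip() == target:
--             tail = lines[i + 1:]
--             for off, nxt in enumerate(tail, 1):
--                 if nxt.startswith(".section"):
--                     return off
--             return len(tail) + 1
--     return 0
-- ===== Notes on version B (the rewrite author's own statement) =====
-- stated objective: simpler
-- what changed: B drops the precomputed section_line_numbers index and the enumerate-over-sections loop, doing one forward scan that finds the matching '.section' header and then the next '.section' line (or the end of the list).
import Mathlib
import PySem

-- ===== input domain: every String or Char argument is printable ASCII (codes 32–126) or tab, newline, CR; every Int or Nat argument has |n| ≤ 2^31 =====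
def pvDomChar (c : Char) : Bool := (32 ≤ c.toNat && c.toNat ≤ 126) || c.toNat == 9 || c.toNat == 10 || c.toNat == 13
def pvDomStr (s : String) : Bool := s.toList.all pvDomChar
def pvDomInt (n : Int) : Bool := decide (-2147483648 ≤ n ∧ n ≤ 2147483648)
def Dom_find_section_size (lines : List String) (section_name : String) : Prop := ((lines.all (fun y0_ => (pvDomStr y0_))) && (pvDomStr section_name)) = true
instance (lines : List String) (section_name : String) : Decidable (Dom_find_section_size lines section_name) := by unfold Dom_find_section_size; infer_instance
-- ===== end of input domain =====

-- B replaces A's precomputed index of '.section' line numbers by one forward scan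
-- that finds the matching header and then the next section header (objective: simpler).

-- ===== PORT A =====
-- [n for n, line in enumerate(lines) if line.startswith(".section")]
def section_line_numbers (lines : List String) : List Int :=
  ((PySem.List.enumerate lines 0).filter
      (fun p => PySem.Str.startswith p.2 ".section")).map (·.1)

-- the 'for n, section in enumerate(sections)' loop of A
def findLoopA (lines : List String) (sections : List Int) (target : String) :
    List (Int × Int) → Int
  | [] => 0
  | (n, s) :: rest =>
      let line := PySem.List.pyGetD lines s ""   -- lines[section]; index always in range
      if PySem.Str.strip line == target then
        if n < (sections.length : Int) - 1 then
          PySem.List.pyGetD sections (n + 1) 0 - s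
        else
          (lines.length : Int) - s
      else findLoopA lines sections target rest

def find_section_size (lines : List String) (section_name : String) : Int :=
  let sections := section_line_numbers lines
  findLoopA lines sections (".section " ++ section_name)
    (PySem.List.enumerate sections 0)

-- ===== PORT B =====
-- inner loop: for off, nxt in enumerate(tail, 1): if nxt.startswith(".section"): return off
-- falling off the end returns len(tail) + 1, which is the current off value there
def innerB : List String → Int → Int
  | [], off => off
  | l :: rest, off =>
      if PySem.Str.startswith l ".section" then off else innerB rest (off + 1)

-- outer loop of Source B: scan for the matching header, then hand the tail to innerB
def outerB (target : String) : List String → Int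
  | [] => 0
  | line :: rest =>
      if PySem.Str.startswith line ".section" && PySem.Str.strip line == target then
        innerB rest 1
      else outerB target rest

def find_section_size_alt (lines : List String) (section_name : String) : Int :=
  outerB (".section " ++ section_name) lines

-- ===== PRECONDITION & SPEC =====
def Spec_find_section_size (lines : List String) (section_name : String) (out : Int) : Prop := out = find_section_size_alt lines section_name
instance (lines : List String) (section_name : String) (out : Int) : Decidable (Spec_find_section_size lines section_name out) := by unfold Spec_find_section_size; infer_instance

-- ===== CLAIM (what is proved, stated in full; the proofs are below) =====
def Claim_equal_find_section_size : Prop := ∀ (lines : List String) (section_name : String), Dom_find_section_size lines section_name → Spec_find_section_size lines section_name (find_section_size lines section_name)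

-- ===== LEMMAS AND PROOFS =====

-- section_line_numbers with a general enumeration start (proof-side)
def secsFrom (ls : List String) (k : Int) : List Int :=
  ((PySem.List.enumerate ls k).filter
      (fun p => PySem.Str.startswith p.2 ".section")).map (·.1)

theorem secsFrom_nil (k : Int) : secsFrom [] k = [] := rfl

theorem secsFrom_cons (l : String) (rest : List String) (k : Int) :
    secsFrom (l :: rest) k =
      if PySem.Str.startswith l ".section" then k :: secsFrom rest (k + 1)
      else secsFrom rest (k + 1) := by
  unfold secsFrom
  rw [PySem.List.enumerate_cons, List.filter_cons]
  by_cases hl : PySem.Str.startswith l ".section"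
  · simp only [hl, if_true, List.map_cons]
  · simp only [hl, Bool.false_eq_true, if_false]

-- A's loop over a middle-loop view: fallback values and successor sections, structurally
def loopA' (lines : List String) (target : String) : List Int → Int
  | [] => 0
  | s :: rest =>
      if PySem.Str.strip (PySem.List.pyGetD lines s "") == target then
        match rest with
        | r :: _ => r - s
        | [] => (lines.length : Int) - s
      else loopA' lines target rest

-- bridge: the enumerate-over-sections loop of A equals loopA' on the section tail
theorem findLoopA_eq (lines : List String) (target : String) :
    ∀ (tailS preS : List Int),
      findLoopA lines (preS ++ tailS) target
        (PySem.List.enumerate tailS (preS.length : Int)) = loopA' lines target tailS := by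
  intro tailS
  induction tailS with
  | nil => intro preS; simp [PySem.List.enumerate_nil, findLoopA, loopA']
  | cons s rest ih =>
      intro preS
      rw [PySem.List.enumerate_cons]
      rw [findLoopA, loopA'.eq_def]
      by_cases hm : PySem.Str.strip (PySem.List.pyGetD lines s "") == target
      · simp only [hm, if_true]
        cases rest with
        | nil => simp
        | cons r rs =>
            have hget : PySem.List.pyGetD (preS ++ s :: r :: rs) ((preS.length : Int) + 1) 0 = r := by
              have hc : ((preS.length : Int) + 1) = ((preS.length + 1 : Nat) : Int) := by push_cast; ring
              rw [hc, PySem.List.pyGetD_natCast]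
              rw [List.getD, List.getElem?_append_right (by omega)]
              simp
            simp [hget]
      · simp only [hm]
        have h1 : ((preS.length : Int) + 1) = (((preS ++ [s]).length : Nat) : Int) := by simp
        rw [h1]
        have := ih (preS ++ [s])
        simpa using this

-- the next-section lookup inside secsFrom equals B's inner scan (offsets relative to s)
theorem innerB_eq (s : Int) :
    ∀ (tail : List String) (a : Nat),
      innerB tail ((a : Int) - s) =
        (secsFrom tail (a : Int)).headD ((a : Int) + tail.length) - s := by
  intro tail
  induction tail with
  | nil => intro a; simp [secsFrom_nil, innerB]
  | cons l rest ih =>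
      intro a
      rw [secsFrom_cons, innerB]
      by_cases hl : PySem.Str.startswith l ".section"
      · simp only [hl, if_true]
        simp
      · simp only [hl, Bool.false_eq_true, if_false]
        have h1 : ((a : Int) - s) + 1 = ((a + 1 : Nat) : Int) - s := by push_cast; ring
        have h2 : ((a : Int) + ((l :: rest).length : Int)) = ((a + 1 : Nat) : Int) + (rest.length : Int) := by
          simp; ring
        have h3 : ((a : Int) + 1) = ((a + 1 : Nat) : Int) := by push_cast; ring
        rw [h1, h2, h3, ih (a + 1)]

-- main lemma: A's loop over the section index of the remaining lines equals B's scan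
theorem loopA'_secsFrom_eq_outerB (target : String) :
    ∀ (rest pre : List String),
      loopA' (pre ++ rest) target (secsFrom rest (pre.length : Int)) = outerB target rest := by
  intro rest
  induction rest with
  | nil => intro pre; simp [secsFrom_nil, loopA', outerB]
  | cons l rest' ih =>
      intro pre
      rw [secsFrom_cons, outerB]
      by_cases hl : PySem.Str.startswith l ".section"
      · simp only [hl, if_true, Bool.true_and]
        have hget : PySem.List.pyGetD (pre ++ l :: rest') ((pre.length : Nat) : Int) "" = l := by
          rw [PySem.List.pyGetD_natCast]
          rw [List.getD, List.getElem?_append_right (by omega)]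
          simp
        rw [loopA'.eq_def]
        simp only [hget]
        by_cases hm : PySem.Str.strip l == target
        · simp only [hm, if_true]
          have h1 : ((pre.length : Int) + 1) = ((pre.length + 1 : Nat) : Int) := by push_cast; ring
          rw [h1]
          have hin : innerB rest' 1 =
              (secsFrom rest' ((pre.length + 1 : Nat) : Int)).headD
                (((pre.length + 1 : Nat) : Int) + rest'.length) - (pre.length : Int) := by
            have h2 : (1 : Int) = ((pre.length + 1 : Nat) : Int) - (pre.length : Int) := by
              push_cast; ring
            rw [h2, innerB_eq (pre.length : Int) rest' (pre.length + 1)]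
          rw [hin]
          cases hx : secsFrom rest' ((pre.length + 1 : Nat) : Int) with
          | nil => simp; ring
          | cons r rs => simp
        · simp only [hm]
          have h1 : ((pre.length : Int) + 1) = (((pre ++ [l]).length : Nat) : Int) := by simp
          rw [h1]
          have := ih (pre ++ [l])
          simpa using this
      · simp only [hl, Bool.false_eq_true, if_false, Bool.false_and]
        have h1 : ((pre.length : Int) + 1) = (((pre ++ [l]).length : Nat) : Int) := by simp
        rw [h1]
        have := ih (pre ++ [l])
        simpa using this

-- ===== VERDICT (by name: the statement is the Claim_ definition above) =====
theorem find_section_size_spec : Claim_equal_find_section_size := by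
  intro lines section_name _
  unfold Spec_find_section_size find_section_size find_section_size_alt
  have h0 : section_line_numbers lines = secsFrom lines 0 := rfl
  have hb := findLoopA_eq lines (".section " ++ section_name) (section_line_numbers lines) []
  simp only [List.nil_append, List.length_nil, Nat.cast_zero] at hb
  rw [hb, h0]
  have := loopA'_secsFrom_eq_outerB (".section " ++ section_name) lines []
  simpa using this
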